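-- pv_equiv track=rewrite | github.com/sub7ata/data-structures-algorithms-python | python_inbuilt_data_structures/string/s7.py | sort_string1
-- ===== SOURCE A (Python) =====
-- def sort_string1(s):
--     letters = ''
--     digits = ''
--     for idx, itm in enumerate(s):
--         if itm.isalpha():
--             letters += itm
--         elif itm.isdigit():
--             digits += itm
--     return ''.join(sorted(letters)) + ''.join(sorted(digits))
-- ===== SOURCE B (Python) =====
-- def sort_string1(s):
--     # One filtered keyed sort: letters (flag 0) before digits (flag 0x110000),
--     # each group ordered by code point, same result as partition+two sorts.
--     return ''.join(sorted((c for c in s if c.isalpha() or c.isdigit()),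
--                           key=lambda c: (0 if c.isalpha() else 0x110000) + ord(c)))
-- ===== Notes on version B (the rewrite author's own statement) =====
-- stated objective: simpler
-- what changed: Replaces A's two-accumulator partition loop plus two separate sorts and a concatenation with a single filtered sort under one composite integer key ((0 if alpha else 0x110000) + ord(c)) that places letters before digits.
import Mathlib
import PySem

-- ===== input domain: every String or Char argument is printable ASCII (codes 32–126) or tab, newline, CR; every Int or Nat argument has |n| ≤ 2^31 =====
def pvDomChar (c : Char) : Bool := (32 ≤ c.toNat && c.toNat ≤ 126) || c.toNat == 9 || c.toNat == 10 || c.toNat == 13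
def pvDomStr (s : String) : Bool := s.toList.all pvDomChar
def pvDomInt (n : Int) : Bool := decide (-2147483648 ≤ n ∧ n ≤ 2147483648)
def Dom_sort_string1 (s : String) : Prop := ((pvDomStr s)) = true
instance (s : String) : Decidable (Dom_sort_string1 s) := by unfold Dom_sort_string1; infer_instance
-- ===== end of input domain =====

-- B replaces A's partition-into-two-strings-plus-two-sorts with a single filtered
-- sort under one composite integer key (letters flagged before digits); objective: simpler.

-- ===== PORT A =====
def sort_string1 (s : String) : String :=
  -- letters = ''; digits = ''; for idx, itm in enumerate(s): …
  let p := (PySem.List.enumerate s.toList 0).foldl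
    (fun (acc : List Char × List Char) iv =>
      if PySem.Chars.isalpha iv.2 then (acc.1 ++ [iv.2], acc.2)
      else if PySem.Chars.isdigit iv.2 then (acc.1, acc.2 ++ [iv.2])
      else acc) ([], [])
  -- return ''.join(sorted(letters)) + ''.join(sorted(digits))
  String.mk (PySem.List.sorted p.1 (fun c => c) false ++ PySem.List.sorted p.2 (fun c => c) false)

-- ===== PORT B =====
-- the composite key (0 if c.isalpha() else 0x110000) + ord(c)
def pvKey (c : Char) : Int := (if PySem.Chars.isalpha c then 0 else 1114112) + (c.toNat : Int)

def sort_string1_alt (s : String) : String :=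
  String.mk (PySem.List.sorted
    (s.toList.filter (fun c => PySem.Chars.isalpha c || PySem.Chars.isdigit c))
    pvKey false)

-- ===== PRECONDITION & SPEC =====
def Spec_sort_string1 (s : String) (out : String) : Prop := out = sort_string1_alt s
instance (s : String) (out : String) : Decidable (Spec_sort_string1 s out) := by unfold Spec_sort_string1; infer_instance

-- ===== CLAIM (what is proved, stated in full; the proofs are below) =====
def Claim_equal_sort_string1 : Prop := ∀ (s : String), Dom_sort_string1 s → Spec_sort_string1 s (sort_string1 s)

-- ===== LEMMAS AND PROOFS =====

theorem char_toNat_lt (c : Char) : c.toNat < 1114112 := by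
  have h := c.valid
  unfold UInt32.isValidChar Nat.isValidChar at h
  rcases h with h | ⟨h1, h2⟩ <;> · rw [Char.toNat]; omega

theorem char_toNat_mono {a b : Char} (h : a ≤ b) : a.toNat ≤ b.toNat := by
  rw [Char.le_def, UInt32.le_iff_toNat_le] at h
  rw [Char.toNat, Char.toNat]; exact h

theorem pvKey_injective : Function.Injective pvKey := by
  intro a b h
  have ha := char_toNat_lt a
  have hb := char_toNat_lt b
  unfold pvKey at h
  have : a.toNat = b.toNat := by split_ifs at h <;> omega
  apply Char.ext
  exact UInt32.toNat_inj.mp (by rw [Char.toNat_val, Char.toNat_val, this])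

-- the loop of A collects exactly the alpha chars and the (non-alpha) digit chars, in order
theorem loopA (cs : List Char) (i : Int) (l d : List Char) :
    (PySem.List.enumerate cs i).foldl
      (fun (acc : List Char × List Char) iv =>
        if PySem.Chars.isalpha iv.2 then (acc.1 ++ [iv.2], acc.2)
        else if PySem.Chars.isdigit iv.2 then (acc.1, acc.2 ++ [iv.2])
        else acc) (l, d)
    = (l ++ cs.filter (fun c => PySem.Chars.isalpha c),
       d ++ cs.filter (fun c => !PySem.Chars.isalpha c && PySem.Chars.isdigit c)) := by
  induction cs generalizing i l d with
  | nil => simp [PySem.List.enumerate_nil]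
  | cons c cs ih =>
    rw [PySem.List.enumerate_cons, List.foldl_cons]
    by_cases h1 : PySem.Chars.isalpha c
    · simp [h1, ih, List.filter_cons]
    · by_cases h2 : PySem.Chars.isdigit c
      · simp [h1, h2, ih, List.filter_cons]
      · simp [h1, h2, ih, List.filter_cons]

theorem filter_split_perm (cs : List Char) :
    (cs.filter (fun c => PySem.Chars.isalpha c) ++
     cs.filter (fun c => !PySem.Chars.isalpha c && PySem.Chars.isdigit c)).Perm
    (cs.filter (fun c => PySem.Chars.isalpha c || PySem.Chars.isdigit c)) := by
  induction cs with
  | nil => simp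
  | cons c cs ih =>
    by_cases h1 : PySem.Chars.isalpha c
    · simpa [List.filter_cons, h1] using ih.cons c
    · by_cases h2 : PySem.Chars.isdigit c
      · simp only [List.filter_cons, h1, h2]
        simp only [Bool.not_false, Bool.true_and]
        exact List.perm_middle.trans (ih.cons c)
      · simpa [List.filter_cons, h1, h2] using ih

theorem sort_string1_spec_aux (s : String) : sort_string1 s = sort_string1_alt s := by
  unfold sort_string1 sort_string1_alt
  rw [loopA]
  simp only [List.nil_append]
  congr 1
  apply PySem.List.eq_of_perm_of_pairwise_le_of_injective pvKey pvKey_injective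
  · -- permutation
    refine (((PySem.List.sorted_perm _ _ _).append (PySem.List.sorted_perm _ _ _)).trans
      ?_).trans (PySem.List.sorted_perm _ _ _).symm
    simpa using filter_split_perm s.toList
  · -- the concatenation of the two sorted halves is key-sorted
    rw [List.pairwise_append]
    refine ⟨?_, ?_, ?_⟩
    · refine (PySem.List.sorted_pairwise _ _).imp_of_mem ?_
      intro a b ha hb hab
      have ha' : PySem.Chars.isalpha a := by
        have := ((PySem.List.mem_sorted _ _ _ _).mp ha); simp [List.mem_filter] at this; exact this.2
      have hb' : PySem.Chars.isalpha b := by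
        have := ((PySem.List.mem_sorted _ _ _ _).mp hb); simp [List.mem_filter] at this; exact this.2
      have := char_toNat_mono hab
      simp [pvKey, ha', hb']; omega
    · refine (PySem.List.sorted_pairwise _ _).imp_of_mem ?_
      intro a b ha hb hab
      have ha' : ¬ PySem.Chars.isalpha a := by
        have := ((PySem.List.mem_sorted _ _ _ _).mp ha); simp [List.mem_filter] at this
        simp [this.2.1]
      have hb' : ¬ PySem.Chars.isalpha b := by
        have := ((PySem.List.mem_sorted _ _ _ _).mp hb); simp [List.mem_filter] at this
        simp [this.2.1]
      have := char_toNat_mono hab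
      simp [pvKey, ha', hb']; omega
    · intro a ha b hb
      have ha' : PySem.Chars.isalpha a := by
        have := ((PySem.List.mem_sorted _ _ _ _).mp ha); simp [List.mem_filter] at this; exact this.2
      have hb' : ¬ PySem.Chars.isalpha b := by
        have := ((PySem.List.mem_sorted _ _ _ _).mp hb); simp [List.mem_filter] at this
        simp [this.2.1]
      have := char_toNat_lt a
      simp [pvKey, ha', hb']; omega
  · -- B's sorted output is key-sorted
    exact PySem.List.sorted_pairwise _ _

-- ===== VERDICT (by name: the statement is the Claim_ definition above) =====
theorem sort_string1_spec : Claim_equal_sort_string1 := by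
  intro s _
  exact sort_string1_spec_aux s
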